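-- pv_equiv track=rewrite | github.com/robdoeswork/AOC | AOC_Day3.py | count_priority
-- ===== SOURCE A (Python) =====
-- def count_priority(item_list: list):
--     mapping = {'a':1, 'b':2, 'c':3, 'd':4, 'e':5, 'f':6,'g': 7, 'h': 8, 'i': 9, 'j': 10, 'k': 11, 'l': 12, 'm': 13, 'n': 14, 'o':15, 'p': 16, 'q': 17, 'r': 18, 's':19, 't':20, 'u':21, 'v':22, 'w':23, 'x':24, 'y': 25, 'z':26}
--     mapping.update({'A':27, 'B':28, 'C':29, 'D':30, 'E':31, 'F':32,'G': 33, 'H': 34, 'I': 35, 'J': 36, 'K': 37, 'L': 38, 'M': 39, 'N': 40, 'O':41,'P': 42, 'Q': 43, 'R': 44, 'S':45, 'T':46, 'U':47, 'V': 48, 'W':49, 'X':50, 'Y': 51, 'Z':52})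
--     priority_total = 0
--     for item in range(len(item_list)):
--         key = item_list[item]
--         priority = mapping.get(key)
--         priority_total = priority_total + priority
--     return priority_total
-- ===== SOURCE B (Python) =====
-- def count_priority(item_list: list):
--     # Group first, then weight: build a frequency table of the items and sum
--     # priority * multiplicity over the DISTINCT items, reading each priority
--     # off the item's position in the alphabet.
--     letters = list('abcdefghijklmnopqrstuvwxyzABCDEFGHIJKLMNOPQRSTUVWXYZ')
--     freq = {}
--     for item in item_list:
--         freq[item] = freq.get(item, 0) + 1
--     return sum((letters.index(k) + 1) * n for k, n in freq.items())
-- ===== Notes on version B (the rewrite author's own statement) =====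
-- stated objective: alternative
-- what changed: Instead of A's single pass that looks every item up in a 52-entry dict, B first groups the items into a frequency table and then sums priority*multiplicity over the distinct items only, reading each priority off the item's position in an alphabet list.
import Mathlib
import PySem

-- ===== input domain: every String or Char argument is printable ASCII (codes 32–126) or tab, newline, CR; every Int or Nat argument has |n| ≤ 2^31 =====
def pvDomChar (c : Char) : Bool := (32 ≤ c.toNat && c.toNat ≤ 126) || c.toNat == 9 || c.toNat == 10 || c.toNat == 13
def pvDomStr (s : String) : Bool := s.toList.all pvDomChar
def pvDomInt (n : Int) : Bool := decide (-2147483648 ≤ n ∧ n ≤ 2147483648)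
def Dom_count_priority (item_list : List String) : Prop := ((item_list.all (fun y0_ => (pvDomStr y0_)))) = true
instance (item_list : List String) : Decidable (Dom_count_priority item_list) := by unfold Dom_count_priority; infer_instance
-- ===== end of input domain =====

-- B groups the items into a frequency table first and then sums priority × multiplicity over the DISTINCT items (priority = position in the alphabet list), instead of A's per-item dict lookup (objective: alternative).

-- ===== PORT A =====
-- mapping = {'a':1, …, 'z':26}
def pvMappingLower : PySem.Dict String Int :=
  PySem.Dict.ofList [("a",1),("b",2),("c",3),("d",4),("e",5),("f",6),("g",7),("h",8),("i",9),("j",10),("k",11),("l",12),("m",13),("n",14),("o",15),("p",16),("q",17),("r",18),("s",19),("t",20),("u",21),("v",22),("w",23),("x",24),("y",25),("z",26)]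
-- mapping.update({'A':27, …, 'Z':52})  (insert each pair in order)
def pvMapping : PySem.Dict String Int :=
  ([("A",27),("B",28),("C",29),("D",30),("E",31),("F",32),("G",33),("H",34),("I",35),("J",36),("K",37),("L",38),("M",39),("N",40),("O",41),("P",42),("Q",43),("R",44),("S",45),("T",46),("U",47),("V",48),("W",49),("X",50),("Y",51),("Z",52)] : List (String × Int)).foldl
    (fun d kv => d.insert kv.1 kv.2) pvMappingLower

def count_priority (item_list : List String) : Int :=
  (PySem.List.pyRange 0 (PySem.List.len item_list) 1).foldl
    (fun priority_total item =>
      let key := PySem.List.pyGetD item_list item ""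
      -- mapping.get(key): on a missing key Python yields None and 'total + None' raises TypeError;
      -- those inputs are excluded by Pre_, so the default 0 is never reached under the claim.
      let priority := (pvMapping.get? key).getD 0
      priority_total + priority) 0

-- ===== PORT B =====
-- letters = list('abc…XYZ')  (the 52 single-character strings, in priority order)
def pvLettersB : List String :=
  "abcdefghijklmnopqrstuvwxyzABCDEFGHIJKLMNOPQRSTUVWXYZ".toList.map (fun c => String.ofList [c])

def count_priority_alt (item_list : List String) : Int :=
  -- freq = {}; for item in item_list: freq[item] = freq.get(item, 0) + 1
  let freq := item_list.foldl (fun d s => d.insert s (d.getD s 0 + 1)) (PySem.Dict.empty)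
  -- sum((letters.index(k) + 1) * n for k, n in freq.items())
  -- letters.index(k) raises ValueError for a non-letter k; excluded by Pre_, so the default 0 is never reached under the claim.
  (freq.items.map (fun kn => (((PySem.List.index? pvLettersB kn.1).getD 0 : Int) + 1) * kn.2)).sum

-- ===== PRECONDITION & SPEC =====
-- the 52 single-letter strings: exactly the keys of A's mapping
def pvLetters : List String :=
  ["a","b","c","d","e","f","g","h","i","j","k","l","m","n","o","p","q","r","s","t","u","v","w","x","y","z",
   "A","B","C","D","E","F","G","H","I","J","K","L","M","N","O","P","Q","R","S","T","U","V","W","X","Y","Z"]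

-- Pre_ excludes exactly the inputs on which A raises TypeError (None + int for any item that is not a
-- single-letter string); it admits every input on which A returns.
def Pre_count_priority (item_list : List String) : Prop :=
  (item_list.all (fun s => decide (s ∈ pvLetters))) = true
instance (item_list : List String) : Decidable (Pre_count_priority item_list) := by
  unfold Pre_count_priority; infer_instance

def pvWitness_count_priority : List String := ["v", "J", "q", "q", "W"]

def Spec_count_priority (item_list : List String) (out : Int) : Prop := out = count_priority_alt item_list
instance (item_list : List String) (out : Int) : Decidable (Spec_count_priority item_list out) := by unfold Spec_count_priority; infer_instance

-- ===== CLAIM (what is proved, stated in full; the proofs are below) =====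
def Claim_equal_count_priority : Prop := ∀ (item_list : List String), Dom_count_priority item_list → Pre_count_priority item_list → Spec_count_priority item_list (count_priority item_list)

-- ===== LEMMAS AND PROOFS =====

-- A's per-item value: the table lookup
def pvPrioA (s : String) : Int := (pvMapping.get? s).getD 0

-- at an admitted letter x, B's alphabet-position priority equals A's lookup (checked over the 52 letters)
set_option maxRecDepth 16384 in
theorem pvIdx_eq_prioA : ∀ x ∈ pvLetters,
    (((PySem.List.index? pvLettersB x).getD 0 : Int) + 1) = pvPrioA x := by
  decide

-- B equals the item-wise sum of A's lookups, for lists of admitted letters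
theorem pvAlt_eq_mapSum (l : List String) (h : ∀ s ∈ l, s ∈ pvLetters) :
    count_priority_alt l = (l.map pvPrioA).sum := by
  unfold count_priority_alt
  rw [PySem.Dict.foldl_insert_getD_add_one_eq_counter]
  show (List.map (fun kn => (((PySem.List.index? pvLettersB kn.1).getD 0 : Int) + 1) * kn.2)
          (PySem.Dict.counter l).items).sum = (l.map pvPrioA).sum
  rw [PySem.Dict.items_counter, List.map_map]
  have hmem : ∀ k ∈ PySem.Set.ofList l, k ∈ pvLetters := by
    intro k hk
    exact h k ((PySem.Set.mem_ofList l k).mp hk)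
  rw [List.map_congr_left
        (l := PySem.Set.ofList l)
        (g := fun k => l.count k • pvPrioA k)
        (fun k hk => by
          simp only [Function.comp]
          rw [pvIdx_eq_prioA k (hmem k hk), nsmul_eq_mul]
          ring)]
  rw [← List.sum_toFinset _ (PySem.Set.nodup_ofList l)]
  rw [show (PySem.Set.ofList l).toFinset = l.toFinset from
        Finset.ext (fun a => by
          simp only [List.mem_toFinset]
          exact PySem.Set.mem_ofList l a)]
  rw [Finset.sum_list_map_count]

-- A's accumulator loop equals acc + the item-wise sum of lookups
theorem pvFold_eq_sum (l : List String) (acc : Int) :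
    l.foldl (fun t s => t + pvPrioA s) acc = acc + (l.map pvPrioA).sum := by
  induction l generalizing acc with
  | nil => simp
  | cons x xs ih =>
    simp only [List.foldl_cons, List.map_cons, List.sum_cons]
    rw [ih]
    ring

-- ===== VERDICT (by name: the statement is the Claim_ definition above) =====
theorem count_priority_spec : Claim_equal_count_priority := by
  intro item_list _hdom hpre
  unfold Spec_count_priority count_priority
  rw [PySem.List.foldl_pyRange_zero_pyGetD item_list ""
        (fun t v => t + (pvMapping.get? v).getD 0) 0]
  rw [show (fun t s => t + (pvMapping.get? s).getD 0) = (fun t s => t + pvPrioA s) from rfl,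
      pvFold_eq_sum item_list 0,
      pvAlt_eq_mapSum item_list (fun s hs => of_decide_eq_true (List.all_eq_true.mp hpre s hs))]
  ring
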